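-- pv_equiv track=rewrite | github.com/SeirinZ/ai-event-analyzer | utils/helpers.py | parse_month_from_query
-- ===== SOURCE A (Python) =====
-- def parse_month_from_query(query):
--     """Parse month information from query"""
--     months_map = {
--         'januari': 1, 'january': 1, 'jan': 1,
--         'februari': 2, 'february': 2, 'feb': 2,
--         'maret': 3, 'march': 3, 'mar': 3,
--         'april': 4, 'apr': 4,
--         'mei': 5, 'may': 5,
--         'juni': 6, 'june': 6, 'jun': 6,
--         'juli': 7, 'july': 7, 'jul': 7,
--         'agustus': 8, 'august': 8, 'aug': 8, 'ags': 8,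
--         'september': 9, 'sept': 9, 'sep': 9,
--         'oktober': 10, 'october': 10, 'oct': 10, 'okt': 10,
--         'november': 11, 'nov': 11,
--         'desember': 12, 'december': 12, 'des': 12, 'dec': 12
--     }
--
--     q = query.lower()
--     found_months = []
--
--     for month_str, month_num in months_map.items():
--         if month_str in q and len(month_str) > 3:  # Avoid short matches
--             found_months.append(month_num)
--
--     return list(set(found_months))
-- ===== SOURCE B (Python) =====
-- def parse_month_from_query(query):
--     """Parse month information from query"""
--     # only variants longer than 3 chars can ever match (A's len > 3 filter)
--     month_of = {
--         'januari': 1, 'january': 1,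
--         'februari': 2, 'february': 2,
--         'maret': 3, 'march': 3,
--         'april': 4,
--         'juni': 6, 'june': 6,
--         'juli': 7, 'july': 7,
--         'agustus': 8, 'august': 8,
--         'september': 9, 'sept': 9,
--         'oktober': 10, 'october': 10,
--         'november': 11,
--         'desember': 12, 'december': 12,
--     }
--     lengths = sorted({len(name) for name in month_of})
--
--     q = query.lower()
--     hits = set()
--     for i in range(len(q)):
--         for L in lengths:
--             m = month_of.get(q[i:i + L])
--             if m is not None:
--                 hits.add(m)
--
--     found_months = [m for m in range(1, 13) if m in hits]
--     return list(set(found_months))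
-- ===== Notes on version B (the rewrite author's own statement) =====
-- stated objective: alternative
-- what changed: B inverts the search direction: instead of A's pass over all 38 name/number pairs testing each name as a substring of the query, B scans the lowered query once position by position and looks up the six fixed-length slices starting there in a hash map of the long (len>3) variants, collecting hit months in a set.
import Mathlib
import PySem

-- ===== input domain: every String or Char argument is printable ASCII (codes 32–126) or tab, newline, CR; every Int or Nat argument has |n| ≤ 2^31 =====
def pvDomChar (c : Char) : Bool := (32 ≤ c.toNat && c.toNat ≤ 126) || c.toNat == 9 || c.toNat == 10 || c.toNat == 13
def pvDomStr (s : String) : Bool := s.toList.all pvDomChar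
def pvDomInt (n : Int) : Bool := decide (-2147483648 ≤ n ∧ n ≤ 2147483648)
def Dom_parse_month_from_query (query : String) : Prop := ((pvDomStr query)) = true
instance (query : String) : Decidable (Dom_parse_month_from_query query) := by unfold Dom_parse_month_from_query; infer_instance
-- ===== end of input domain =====

-- B replaces A's per-name substring scans by a single left-to-right scan of the query that
-- looks fixed-length slices up in a hash map (objective: alternative algorithm, same cost class).
set_option maxHeartbeats 1000000


-- ===== PORT A =====
-- Both Pythons end with `list(set(found_months))`, whose order is CPython's int-set hash order.
-- pySetList models it EXACTLY for the values arising here (small non-negative ints, hash(x) = x):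
-- open addressing, initial table of 8 slots, probe i = i*5 + 1 + (perturb >>= 5), resize at
-- fill*5 >= mask*3 to the next power of two above used*4, output by table-slot scan.
-- (CPython's LINEAR_PROBES sub-scan is unreachable here: i + 9 <= mask is false for size-8
-- tables and the values 1..12 are collision-free in every larger table; duplicate insertions
-- are no-ops in CPython, so the distinct elements are inserted in first-occurrence order.)
def cpyProbe (t : List (Option Int)) (x : Int) : Nat → Nat → Nat → List (Option Int)
  | _, _, 0 => t
  | i, perturb, fuel+1 =>
    match t.getD i none with
    | none => t.set i (some x)
    | some y => if y = x then t else
        cpyProbe t x ((i * 5 + 1 + perturb / 32) % t.length) (perturb / 32) fuel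

def cpyInsert0 (t : List (Option Int)) (x : Int) : List (Option Int) :=
  cpyProbe t x (x.toNat % t.length) x.toNat (t.length + 32)

-- while newsize <= minused: newsize <<= 1
def cpyNewSize (minused : Nat) : Nat → Nat → Nat
  | n, 0 => n
  | n, fuel+1 => if minused < n then n else cpyNewSize minused (2 * n) fuel

def cpyInsert (t : List (Option Int)) (x : Int) : List (Option Int) :=
  let t' := cpyInsert0 t x
  let fill := (t'.filterMap id).length
  if (t'.length - 1) * 3 ≤ fill * 5 then
    (t'.filterMap id).foldl cpyInsert0 (List.replicate (cpyNewSize (fill * 4) 8 32) none)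
  else t'

-- list(set(xs)) under the model above
def pySetList (xs : List Int) : List Int :=
  ((PySem.Set.ofList xs).foldl cpyInsert (List.replicate 8 none)).filterMap id

def monthsMapA : List (String × Int) :=
  [("januari", 1), ("january", 1), ("jan", 1),
   ("februari", 2), ("february", 2), ("feb", 2),
   ("maret", 3), ("march", 3), ("mar", 3),
   ("april", 4), ("apr", 4),
   ("mei", 5), ("may", 5),
   ("juni", 6), ("june", 6), ("jun", 6),
   ("juli", 7), ("july", 7), ("jul", 7),
   ("agustus", 8), ("august", 8), ("aug", 8), ("ags", 8),
   ("september", 9), ("sept", 9), ("sep", 9),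
   ("oktober", 10), ("october", 10), ("oct", 10), ("okt", 10),
   ("november", 11), ("nov", 11),
   ("desember", 12), ("december", 12), ("des", 12), ("dec", 12)]

def parse_month_from_query (query : String) : List Int :=
  let q := PySem.Str.lower query
  let found_months := monthsMapA.foldl
    (fun acc p => if PySem.Str.isIn p.1 q && decide (3 < PySem.Str.len p.1) then acc ++ [p.2] else acc) []
  pySetList found_months

-- ===== PORT B =====
-- Source B's month_of: only the variants longer than 3 characters
def monthOfB : PySem.Dict String Int :=
  PySem.Dict.ofList
  [("januari", 1), ("january", 1),
   ("februari", 2), ("february", 2),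
   ("maret", 3), ("march", 3),
   ("april", 4),
   ("juni", 6), ("june", 6),
   ("juli", 7), ("july", 7),
   ("agustus", 8), ("august", 8),
   ("september", 9), ("sept", 9),
   ("oktober", 10), ("october", 10),
   ("november", 11),
   ("desember", 12), ("december", 12)]

-- lengths = sorted({len(name) for name in month_of})
def lengthsB : List Int :=
  PySem.List.sorted (PySem.Set.ofList ((PySem.Dict.keys monthOfB).map PySem.Str.len)) (fun x => x) false

def parse_month_from_query_alt (query : String) : List Int :=
  let q := PySem.Str.lower query
  let hits := (PySem.List.pyRange 0 (PySem.Str.len q) 1).foldl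
    (fun hits i => lengthsB.foldl
      (fun hits L =>
        match PySem.Dict.get? monthOfB (PySem.Str.slice q (some i) (some (i + L))) with
        | some m => PySem.Set.add hits m
        | none => hits) hits)
    PySem.Set.empty
  let found_months := (PySem.List.pyRange 1 13 1).foldl
    (fun acc m => if PySem.Set.contains hits m then acc ++ [m] else acc) ([] : List Int)
  pySetList found_months

-- ===== PRECONDITION & SPEC =====
def Spec_parse_month_from_query (query : String) (out : List Int) : Prop := out = parse_month_from_query_alt query
instance (query : String) (out : List Int) : Decidable (Spec_parse_month_from_query query out) := by unfold Spec_parse_month_from_query; infer_instance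

-- ===== CLAIM (what is proved, stated in full; the proofs are below) =====
def Claim_equal_parse_month_from_query : Prop := ∀ (query : String), Dom_parse_month_from_query query → Spec_parse_month_from_query query (parse_month_from_query query)

-- ===== LEMMAS AND PROOFS =====

-- the per-element condition of A's pass and its found_months list, in filter form
def pvCondA (q : String) (p : String × Int) : Bool :=
  PySem.Str.isIn p.1 q && decide (3 < PySem.Str.len p.1)

def pvFoundA (q : String) : List Int := (monthsMapA.filter (pvCondA q)).map Prod.snd

-- B's hit set and its found_months list, in filter form
def pvHits (q : String) : PySem.Set Int :=
  (PySem.List.pyRange 0 (PySem.Str.len q) 1).foldl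
    (fun hits i => lengthsB.foldl
      (fun hits L =>
        match PySem.Dict.get? monthOfB (PySem.Str.slice q (some i) (some (i + L))) with
        | some m => PySem.Set.add hits m
        | none => hits) hits)
    PySem.Set.empty

def pvCondB (q : String) (m : Int) : Bool := PySem.Set.contains (pvHits q) m

def pvFoundB (q : String) : List Int := (PySem.List.pyRange 1 13 1).filter (pvCondB q)

-- "some long variant with value m occurs in q"
def pvOccurs (q : String) (m : Int) : Prop :=
  ∃ name : String, PySem.Dict.get? monthOfB name = some m ∧ PySem.Str.isIn name q = true

lemma pvRange12 : PySem.List.pyRange 1 13 1 = [1, 2, 3, 4, 5, 6, 7, 8, 9, 10, 11, 12] := by decide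

lemma pvLengthsB : lengthsB = [4, 5, 6, 7, 8, 9] := by decide

lemma pvFoundA_eq (q : String) :
    monthsMapA.foldl
      (fun acc p => if PySem.Str.isIn p.1 q && decide (3 < PySem.Str.len p.1) then acc ++ [p.2] else acc) []
      = pvFoundA q := by
  rw [pvFoundA]
  rw [show (fun (acc : List Int) (p : String × Int) =>
        if PySem.Str.isIn p.1 q && decide (3 < PySem.Str.len p.1) then acc ++ [p.2] else acc)
      = (fun acc p => if pvCondA q p then acc ++ [Prod.snd p] else acc) from rfl]
  rw [PySem.List.foldl_append_if]
  simp

lemma pvFoundB_eq (q : String) :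
    (PySem.List.pyRange 1 13 1).foldl
      (fun acc m => if PySem.Set.contains (pvHits q) m then acc ++ [m] else acc) ([] : List Int)
      = pvFoundB q := by
  rw [pvFoundB]
  rw [show (fun (acc : List Int) (m : Int) =>
        if PySem.Set.contains (pvHits q) m then acc ++ [m] else acc)
      = (fun acc m => if pvCondB q m then acc ++ [m] else acc) from rfl]
  rw [PySem.List.foldl_append_if_eq_filter]
  simp

-- membership through B's nested fold
lemma pvMem_inner (g : Int → Option Int) (x : Int) : ∀ (Ls : List Int) (s : PySem.Set Int),
    (x ∈ Ls.foldl (fun s L => match g L with | some m => PySem.Set.add s m | none => s) s ↔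
      x ∈ s ∨ ∃ L ∈ Ls, g L = some x) := by
  intro Ls
  induction Ls with
  | nil => intro s; simp
  | cons L Ls ih =>
    intro s
    simp only [List.foldl_cons]
    cases hg : g L with
    | none =>
      rw [ih s]
      simp only [List.mem_cons]
      constructor
      · rintro (h | ⟨L', hL', hg'⟩); exact Or.inl h; exact Or.inr ⟨L', Or.inr hL', hg'⟩
      · rintro (h | ⟨L', (rfl | hL'), hg'⟩)
        · exact Or.inl h
        · rw [hg] at hg'; cases hg'
        · exact Or.inr ⟨L', hL', hg'⟩
    | some m =>
      rw [ih (PySem.Set.add s m), PySem.Set.mem_add]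
      simp only [List.mem_cons]
      constructor
      · rintro ((h | rfl) | ⟨L', hL', hg'⟩)
        · exact Or.inl h
        · exact Or.inr ⟨L, Or.inl rfl, hg⟩
        · exact Or.inr ⟨L', Or.inr hL', hg'⟩
      · rintro (h | ⟨L', (rfl | hL'), hg'⟩)
        · exact Or.inl (Or.inl h)
        · rw [hg] at hg'; injection hg' with h'; exact Or.inl (Or.inr h'.symm)
        · exact Or.inr ⟨L', hL', hg'⟩

lemma pvMem_pvHits (q : String) (x : Int) :
    x ∈ pvHits q ↔ ∃ i, (0 ≤ i ∧ i < PySem.Str.len q) ∧ ∃ L ∈ lengthsB,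
      PySem.Dict.get? monthOfB (PySem.Str.slice q (some i) (some (i + L))) = some x := by
  rw [pvHits]
  have main : ∀ (is : List Int) (s : PySem.Set Int),
      x ∈ is.foldl (fun hits i => lengthsB.foldl
        (fun hits L =>
          match PySem.Dict.get? monthOfB (PySem.Str.slice q (some i) (some (i + L))) with
          | some m => PySem.Set.add hits m
          | none => hits) hits) s ↔
      x ∈ s ∨ ∃ i ∈ is, ∃ L ∈ lengthsB,
        PySem.Dict.get? monthOfB (PySem.Str.slice q (some i) (some (i + L))) = some x := by
    intro is
    induction is with
    | nil => intro s; simp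
    | cons i is ih =>
      intro s
      simp only [List.foldl_cons]
      rw [ih, pvMem_inner (fun L => PySem.Dict.get? monthOfB (PySem.Str.slice q (some i) (some (i + L)))) x lengthsB s]
      simp only [List.mem_cons]
      constructor
      · rintro ((h | h) | ⟨i', hi', h⟩)
        · exact Or.inl h
        · exact Or.inr ⟨i, Or.inl rfl, h⟩
        · exact Or.inr ⟨i', Or.inr hi', h⟩
      · rintro (h | ⟨i', (rfl | hi'), h⟩)
        · exact Or.inl (Or.inl h)
        · exact Or.inl (Or.inr h)
        · exact Or.inr ⟨i', hi', h⟩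
  rw [main]
  simp only [PySem.Set.empty, List.not_mem_nil, false_or, PySem.List.mem_pyRange_one]

-- every key of month_of is in monthsMapA with the same value, is longer than 3 chars,
-- and its length is listed in lengthsB
lemma pvGet?_spec (name : String) (m : Int) (h : PySem.Dict.get? monthOfB name = some m) :
    (name, m) ∈ monthsMapA ∧ 3 < PySem.Str.len name ∧
      ((name.toList.length : Int) ∈ lengthsB ∧ name.toList ≠ []) := by
  have hitems := PySem.Dict.mem_items_of_get?_eq_some monthOfB h
  have hlit : monthOfB.items =
    [("januari", 1), ("january", 1),
     ("februari", 2), ("february", 2),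
     ("maret", 3), ("march", 3),
     ("april", 4),
     ("juni", 6), ("june", 6),
     ("juli", 7), ("july", 7),
     ("agustus", 8), ("august", 8),
     ("september", 9), ("sept", 9),
     ("oktober", 10), ("october", 10),
     ("november", 11),
     ("desember", 12), ("december", 12)] := by rfl
  rw [hlit] at hitems
  simp only [List.mem_cons, List.not_mem_nil, or_false, Prod.mk.injEq] at hitems
  rcases hitems with ⟨rfl,rfl⟩|⟨rfl,rfl⟩|⟨rfl,rfl⟩|⟨rfl,rfl⟩|⟨rfl,rfl⟩|⟨rfl,rfl⟩|⟨rfl,rfl⟩|⟨rfl,rfl⟩|⟨rfl,rfl⟩|⟨rfl,rfl⟩|⟨rfl,rfl⟩|⟨rfl,rfl⟩|⟨rfl,rfl⟩|⟨rfl,rfl⟩|⟨rfl,rfl⟩|⟨rfl,rfl⟩|⟨rfl,rfl⟩|⟨rfl,rfl⟩|⟨rfl,rfl⟩|⟨rfl,rfl⟩ <;>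
    exact ⟨by decide, by decide, by decide, by decide⟩

lemma pvMapA_get : ∀ p ∈ monthsMapA, 3 < PySem.Str.len p.1 → PySem.Dict.get? monthOfB p.1 = some p.2 := by
  decide

lemma pvHits_iff_occurs (q : String) (x : Int) : x ∈ pvHits q ↔ pvOccurs q x := by
  rw [pvMem_pvHits]
  constructor
  · rintro ⟨i, ⟨hi0, -⟩, L, hL, hget⟩
    refine ⟨PySem.Str.slice q (some i) (some (i + L)), hget, ?_⟩
    have hL4 : 4 ≤ L := by
      rw [pvLengthsB] at hL
      simp only [List.mem_cons, List.not_mem_nil, or_false] at hL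
      rcases hL with rfl | rfl | rfl | rfl | rfl | rfl <;> omega
    have hb : 0 ≤ i + L := by omega
    have hpre : (PySem.Str.slice q (some i) (some (i + L))).toList <+: q.toList.drop i.toNat := by
      rw [show (PySem.Str.slice q (some i) (some (i + L))).toList =
          PySem.List.slice q.toList (some i) (some (i + L)) from by simp [PySem.Str.toList_slice]]
      rw [PySem.List.slice_toNat _ hi0 hb]
      exact List.take_prefix _ _
    have := (PySem.Chars.exists_prefix_drop_iff_isIn _ _).mp ⟨i.toNat, hpre⟩
    simpa using this
  · rintro ⟨name, hget, hin⟩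
    obtain ⟨-, -, hlen, hne⟩ := pvGet?_spec name x hget
    have hin' : PySem.Chars.isIn name.toList q.toList = true := by simpa using hin
    obtain ⟨j, hp⟩ := (PySem.Chars.exists_prefix_drop_iff_isIn _ _).mpr hin'
    have hjlt : j < q.toList.length := by
      by_contra hle
      rw [List.drop_eq_nil_of_le (Nat.le_of_not_lt hle)] at hp
      exact hne (List.prefix_nil.mp hp)
    refine ⟨(j : Int), ⟨by positivity, ?_⟩, (name.toList.length : Int), hlen, ?_⟩
    · have : PySem.Str.len q = (q.toList.length : Int) := by simp
      rw [this]; exact_mod_cast hjlt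
    · have hslice : PySem.Str.slice q (some (j : Int)) (some ((j : Int) + (name.toList.length : Int))) = name := by
        apply String.toList_inj.mp
        have htl : (PySem.Str.slice q (some (j:Int)) (some ((j:Int) + (name.toList.length : Int)))).toList =
            PySem.List.slice q.toList (some (j:Int)) (some ((j:Int) + (name.toList.length : Int))) := by
          simp [PySem.Str.toList_slice]
        rw [htl, PySem.List.slice_natCast_add]
        exact ((List.prefix_iff_eq_take.mp hp).symm)
      rw [hslice]
      exact hget

lemma pvFoundA_iff (q : String) (m : Int) : m ∈ pvFoundA q ↔ pvOccurs q m := by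
  constructor
  · intro h
    simp only [pvFoundA, List.mem_map, List.mem_filter] at h
    obtain ⟨p, ⟨hp, hc⟩, rfl⟩ := h
    rw [pvCondA, Bool.and_eq_true, decide_eq_true_eq] at hc
    exact ⟨p.1, pvMapA_get p hp hc.2, hc.1⟩
  · rintro ⟨name, hget, hin⟩
    obtain ⟨hmem, hlen3, -⟩ := pvGet?_spec name m hget
    simp only [pvFoundA, List.mem_map, List.mem_filter]
    refine ⟨(name, m), ⟨hmem, ?_⟩, rfl⟩
    rw [pvCondA, Bool.and_eq_true, decide_eq_true_eq]
    exact ⟨hin, hlen3⟩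

-- Set.ofList keeps a subsequence of its argument
lemma pvFoldlAdd_sublist (xs : List Int) : ∀ s : List Int,
    ∃ t, List.foldl PySem.Set.add s xs = s ++ t ∧ t.Sublist xs := by
  induction xs with
  | nil => intro s; exact ⟨[], by simp⟩
  | cons x xs ih =>
    intro s
    simp only [List.foldl_cons]
    by_cases hx : x ∈ s
    · obtain ⟨t, h1, h2⟩ := ih s
      have hadd : PySem.Set.add s x = s := by simp [PySem.Set.add, hx]
      exact ⟨t, by rw [hadd, h1], h2.cons x⟩
    · obtain ⟨t, h1, h2⟩ := ih (s ++ [x])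
      have hadd : PySem.Set.add s x = s ++ [x] := by simp [PySem.Set.add, hx]
      exact ⟨x :: t, by rw [hadd, h1]; simp, h2.cons₂ x⟩

lemma pvOfList_sublist (xs : List Int) : (PySem.Set.ofList xs).Sublist xs := by
  obtain ⟨t, h1, h2⟩ := pvFoldlAdd_sublist xs []
  rw [PySem.Set.ofList_eq_foldl, h1]
  simpa using h2

lemma pvFoundA_pairwise (q : String) : (pvFoundA q).Pairwise (· ≤ ·) := by
  have hsub : (pvFoundA q).Sublist (monthsMapA.map Prod.snd) :=
    List.filter_sublist.map Prod.snd
  have hall : (monthsMapA.map Prod.snd).Pairwise (fun a b : Int => a ≤ b) := by decide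
  exact hall.sublist hsub

lemma pvFoundB_pairwise (q : String) : (pvFoundB q).Pairwise (· ≤ ·) := by
  have hsub : (pvFoundB q).Sublist (PySem.List.pyRange 1 13 1) := List.filter_sublist
  have hall : (PySem.List.pyRange 1 13 1).Pairwise (fun a b : Int => a ≤ b) := by
    rw [pvRange12]; decide
  exact hall.sublist hsub

lemma pvFoundB_nodup (q : String) : (pvFoundB q).Nodup := by
  have : (PySem.List.pyRange 1 13 1).Nodup := by rw [pvRange12]; decide
  exact this.filter _

lemma pvSnd_range : ∀ m ∈ monthsMapA.map Prod.snd, m ∈ ([1, 2, 3, 4, 5, 6, 7, 8, 9, 10, 11, 12] : List Int) := by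
  decide

lemma pvMem_iff (q : String) (m : Int) : m ∈ pvFoundA q ↔ m ∈ pvFoundB q := by
  rw [pvFoundA_iff]
  simp only [pvFoundB, List.mem_filter, pvCondB, PySem.Set.contains_iff, pvHits_iff_occurs]
  constructor
  · intro h
    refine ⟨?_, h⟩
    obtain ⟨name, hget, -⟩ := h
    have hm := (pvGet?_spec name m hget).1
    rw [pvRange12]
    have hmem : m ∈ monthsMapA.map Prod.snd := List.mem_map_of_mem hm
    exact pvSnd_range m hmem
  · exact fun h => h.2

lemma pvFound_eq (q : String) : PySem.Set.ofList (pvFoundA q) = pvFoundB q := by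
  refine List.Perm.eq_of_pairwise'
    ((pvFoundA_pairwise q).sublist (pvOfList_sublist _)) (pvFoundB_pairwise q) ?_
  refine (List.perm_ext_iff_of_nodup (PySem.Set.nodup_ofList _) (pvFoundB_nodup q)).2 ?_
  intro a
  rw [PySem.Set.mem_ofList]
  exact pvMem_iff q a

-- ===== VERDICT (by name: the statement is the Claim_ definition above) =====
theorem parse_month_from_query_spec : Claim_equal_parse_month_from_query := by
  intro q _
  show parse_month_from_query q = parse_month_from_query_alt q
  have hA : parse_month_from_query q = pySetList (pvFoundA (PySem.Str.lower q)) := by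
    simp only [parse_month_from_query]; rw [pvFoundA_eq]
  have hB : parse_month_from_query_alt q = pySetList (pvFoundB (PySem.Str.lower q)) := by
    show pySetList ((PySem.List.pyRange 1 13 1).foldl
      (fun acc m => if PySem.Set.contains (pvHits (PySem.Str.lower q)) m then acc ++ [m] else acc)
      ([] : List Int)) = _
    rw [pvFoundB_eq]
  rw [hA, hB]
  unfold pySetList
  rw [pvFound_eq, ← pvFound_eq (PySem.Str.lower q), PySem.Set.ofList_ofList]
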